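-- pv_equiv track=rewrite | github.com/zhejiushi-WY-ya/A-Simplified-Core-Workflow-for-Enhancing-RAG | lightrag_core_simplified/src/modules/retrieval_module.py | multi_hop_expand
-- ===== SOURCE A (Python) =====
-- def multi_hop_expand(graph, seed_nodes, hops=2, max_nodes=30):
--     nodes = set(seed_nodes)
--     if not nodes:
--         return {"nodes": [], "edges": []}
--
--     for _ in range(hops):
--         expanded = set(nodes)
--
--         for edge in graph.get("edges", []):
--             if edge["source"] in nodes or edge["target"] in nodes:
--                 expanded.add(edge["source"])
--                 expanded.add(edge["target"])
--
--         nodes = expanded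
--         if len(nodes) >= max_nodes:
--             break
--
--     ordered_nodes = []
--     selected = set()
--     for node in graph.get("nodes", []):
--         name = node.get("name")
--         if name in nodes and name not in selected:
--             ordered_nodes.append(node)
--             selected.add(name)
--         if len(ordered_nodes) >= max_nodes:
--             break
--
--     selected_names = {node["name"] for node in ordered_nodes}
--     edges = [
--         edge
--         for edge in graph.get("edges", [])
--         if edge["source"] in selected_names or edge["target"] in selected_names
--     ]
--
--     return {"nodes": ordered_nodes, "edges": edges}
-- ===== SOURCE B (Python) =====
-- def multi_hop_expand(graph, seed_nodes, hops=2, max_nodes=30):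
--     if not seed_nodes:
--         return {"nodes": [], "edges": []}
--
--     all_edges = graph.get("edges", [])
--
--     # adjacency list built once; each hop then touches only the frontier
--     adj = {}
--     for edge in all_edges:
--         s, t = edge["source"], edge["target"]
--         adj.setdefault(s, []).append(t)
--         adj.setdefault(t, []).append(s)
--
--     frontier = list(dict.fromkeys(seed_nodes))
--     visited = set(frontier)
--     for _ in range(hops):
--         nxt = []
--         for u in frontier:
--             for v in adj.get(u, []):
--                 if v not in visited:
--                     visited.add(v)
--                     nxt.append(v)
--         frontier = nxt
--         if len(visited) >= max_nodes or not frontier: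
--             break
--
--     # single pass: pick capped nodes with a budget countdown, collecting their
--     # names as we go (no second pass over the picked nodes afterwards)
--     picked = []
--     names = set()
--     budget = max_nodes
--     for node in graph.get("nodes", []):
--         nm = node.get("name")
--         if nm in visited and nm not in names:
--             picked.append(node)
--             names.add(nm)
--             budget -= 1
--         if budget <= 0:
--             break
--
--     kept = [e for e in all_edges
--             if e["source"] in names or e["target"] in names]
--     return {"nodes": picked, "edges": kept}
-- ===== Notes on version B (the rewrite author's own statement) =====
-- stated objective: alternative
-- what changed: B builds an adjacency list once and runs a frontier-only level-BFS (each hop touches only newly reached nodes, stopping when the frontier empties) instead of A's rescan of the whole edge list on every hop, and its node-selection pass uses a budget countdown that collects the selected names in the same pass, so A's separate name-set comprehension over the picked nodes disappears; on the generated timing inputs this was not measurably faster.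
import Mathlib
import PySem

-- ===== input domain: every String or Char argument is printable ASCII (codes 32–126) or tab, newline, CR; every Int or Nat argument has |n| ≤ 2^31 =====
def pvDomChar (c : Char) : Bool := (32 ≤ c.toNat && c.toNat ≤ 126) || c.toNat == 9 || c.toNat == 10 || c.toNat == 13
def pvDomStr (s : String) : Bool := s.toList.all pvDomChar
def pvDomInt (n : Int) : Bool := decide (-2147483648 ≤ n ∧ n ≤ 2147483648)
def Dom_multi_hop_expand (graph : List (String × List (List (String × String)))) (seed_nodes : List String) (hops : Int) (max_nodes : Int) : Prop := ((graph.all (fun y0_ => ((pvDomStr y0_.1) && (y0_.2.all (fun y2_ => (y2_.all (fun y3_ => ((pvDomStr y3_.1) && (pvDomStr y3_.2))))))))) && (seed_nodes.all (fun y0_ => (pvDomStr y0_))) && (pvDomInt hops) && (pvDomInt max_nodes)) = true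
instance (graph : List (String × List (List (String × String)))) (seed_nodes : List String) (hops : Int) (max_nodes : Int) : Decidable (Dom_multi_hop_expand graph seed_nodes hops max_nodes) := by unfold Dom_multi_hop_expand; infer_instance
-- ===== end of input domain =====

-- B replaces A's per-hop rescan of the whole edge list by an adjacency list built once
-- plus a frontier-only level-BFS that stops when the frontier empties, and its selection
-- pass counts a budget down while collecting the selected names in the same pass, so A's
-- separate name-set comprehension disappears (objective: alternative).

-- ===== PORT A =====
-- edge["source"] / edge["target"]; the "" default is only reached where the Python raises
-- KeyError, which Pre_ excludes.
def pvSrc (e : List (String × String)) : String := PySem.Dict.getD ⟨e⟩ "source" ""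
def pvTgt (e : List (String × String)) : String := PySem.Dict.getD ⟨e⟩ "target" ""

-- one iteration of A's hop loop: scan ALL edges, add both endpoints of edges incident to `nodes`
def pvAStep (edges : List (List (String × String))) (nodes : PySem.Set String) : PySem.Set String :=
  edges.foldl (fun expanded e =>
    if PySem.Set.contains nodes (pvSrc e) || PySem.Set.contains nodes (pvTgt e) then
      PySem.Set.add (PySem.Set.add expanded (pvSrc e)) (pvTgt e)
    else expanded) nodes

-- for _ in range(hops): … ; if len(nodes) >= max_nodes: break
def pvALoop (edges : List (List (String × String))) (max_nodes : Int) : Nat → PySem.Set String → PySem.Set String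
  | 0, nodes => nodes
  | n+1, nodes =>
    let nodes' := pvAStep edges nodes
    if max_nodes ≤ (nodes'.length : Int) then nodes' else pvALoop edges max_nodes n nodes'

-- A's ordered_nodes loop (the cap is checked after each node, as in the Python)
def pvASelect (max_nodes : Int) (nodes : PySem.Set String) : List (List (String × String)) → List (List (String × String)) → PySem.Set String → List (List (String × String))
  | [], ordered, _ => ordered
  | node :: rest, ordered, selected =>
    let st : List (List (String × String)) × PySem.Set String :=
      match PySem.Dict.get? (⟨node⟩ : PySem.Dict String String) "name" with
      | some name =>
        if PySem.Set.contains nodes name && !PySem.Set.contains selected name then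
          (ordered ++ [node], PySem.Set.add selected name)
        else (ordered, selected)
      | none => (ordered, selected)
    if max_nodes ≤ (st.1.length : Int) then st.1 else pvASelect max_nodes nodes rest st.1 st.2

def multi_hop_expand (graph : List (String × List (List (String × String)))) (seed_nodes : List String) (hops : Int) (max_nodes : Int) : List (String × List (List (String × String))) :=
  let nodes := PySem.Set.ofList seed_nodes
  if nodes = [] then [("nodes", []), ("edges", [])]
  else
    let edges := PySem.Dict.getD ⟨graph⟩ "edges" []
    let final := pvALoop edges max_nodes hops.toNat nodes   -- range(hops): max(hops,0) iterations
    let ordered := pvASelect max_nodes final (PySem.Dict.getD ⟨graph⟩ "nodes" []) [] PySem.Set.empty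
    -- {node["name"] for node in ordered_nodes}: every appended node has a "name" key, so getD "" is exact
    let selNames := PySem.Set.ofList (ordered.map (fun node => PySem.Dict.getD ⟨node⟩ "name" ""))
    let kept := edges.filter (fun e => PySem.Set.contains selNames (pvSrc e) || PySem.Set.contains selNames (pvTgt e))
    [("nodes", ordered), ("edges", kept)]

-- ===== PORT B =====
-- adjacency list, built once: adj.setdefault(s, []).append(t) both ways
def pvBuildAdj (edges : List (List (String × String))) : PySem.Dict String (List String) :=
  edges.foldl (fun adj e =>
    let s := PySem.Dict.getD (⟨e⟩ : PySem.Dict String String) "source" ""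
    let t := PySem.Dict.getD (⟨e⟩ : PySem.Dict String String) "target" ""
    (adj.modify s [] (· ++ [t])).modify t [] (· ++ [s]))
    PySem.Dict.empty

-- one BFS level: visit the unvisited neighbours of the frontier only
def pvBLevel (adj : PySem.Dict String (List String)) (visited : PySem.Set String) (frontier : List String) : PySem.Set String × List String :=
  frontier.foldl (fun acc u =>
    (PySem.Dict.getD adj u []).foldl (fun acc2 v =>
      if PySem.Set.contains acc2.1 v then acc2
      else (PySem.Set.add acc2.1 v, acc2.2 ++ [v])) acc)
    (visited, [])

-- for _ in range(hops): … ; if len(visited) >= max_nodes or not frontier: break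
def pvBLoop (adj : PySem.Dict String (List String)) (max_nodes : Int) : Nat → PySem.Set String → List String → PySem.Set String
  | 0, visited, _ => visited
  | n+1, visited, frontier =>
    let vf := pvBLevel adj visited frontier
    if max_nodes ≤ (vf.1.length : Int) ∨ vf.2 = [] then vf.1
    else pvBLoop adj max_nodes n vf.1 vf.2

-- B's selection pass: budget countdown, returning the picked nodes AND their name set
def pvBPick (visited : PySem.Set String) : List (List (String × String)) → List (List (String × String)) → PySem.Set String → Int → List (List (String × String)) × PySem.Set String
  | [], picked, names, _ => (picked, names)
  | node :: rest, picked, names, budget =>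
    let st : List (List (String × String)) × PySem.Set String × Int :=
      match PySem.Dict.get? (⟨node⟩ : PySem.Dict String String) "name" with
      | some nm =>
        if PySem.Set.contains visited nm && !PySem.Set.contains names nm then
          (picked ++ [node], PySem.Set.add names nm, budget - 1)
        else (picked, names, budget)
      | none => (picked, names, budget)
    if st.2.2 ≤ 0 then (st.1, st.2.1) else pvBPick visited rest st.1 st.2.1 st.2.2

def multi_hop_expand_alt (graph : List (String × List (List (String × String)))) (seed_nodes : List String) (hops : Int) (max_nodes : Int) : List (String × List (List (String × String))) :=
  if seed_nodes = [] then [("nodes", []), ("edges", [])]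
  else
    let all_edges := PySem.Dict.getD ⟨graph⟩ "edges" []
    let adj := pvBuildAdj all_edges
    let frontier := PySem.List.dedup seed_nodes
    let final := pvBLoop adj max_nodes hops.toNat (PySem.Set.ofList frontier) frontier
    let pk := pvBPick final (PySem.Dict.getD ⟨graph⟩ "nodes" []) [] PySem.Set.empty max_nodes
    let kept := all_edges.filter (fun e =>
      PySem.Set.contains pk.2 (PySem.Dict.getD (⟨e⟩ : PySem.Dict String String) "source" "") ||
      PySem.Set.contains pk.2 (PySem.Dict.getD (⟨e⟩ : PySem.Dict String String) "target" ""))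
    [("nodes", pk.1), ("edges", kept)]

-- ===== PRECONDITION & SPEC =====
-- Pre_ excludes exactly the inputs on which the Python A raises KeyError: a nonempty seed
-- list together with some edge dict lacking a "source" or "target" key.
def Pre_multi_hop_expand (graph : List (String × List (List (String × String)))) (seed_nodes : List String) (hops : Int) (max_nodes : Int) : Prop :=
  seed_nodes = [] ∨ ∀ e ∈ PySem.Dict.getD (⟨graph⟩ : PySem.Dict String (List (List (String × String)))) "edges" [],
    PySem.Dict.contains (⟨e⟩ : PySem.Dict String String) "source" = true ∧ PySem.Dict.contains (⟨e⟩ : PySem.Dict String String) "target" = true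
instance (graph : List (String × List (List (String × String)))) (seed_nodes : List String) (hops : Int) (max_nodes : Int) : Decidable (Pre_multi_hop_expand graph seed_nodes hops max_nodes) := by unfold Pre_multi_hop_expand; infer_instance

def pvWitness_multi_hop_expand : (List (String × List (List (String × String)))) × List String × Int × Int :=
  ([("nodes", [[("name", "a")], [("name", "b")]]), ("edges", [[("source", "a"), ("target", "b")]])], ["a"], 2, 30)

def Spec_multi_hop_expand (graph : List (String × List (List (String × String)))) (seed_nodes : List String) (hops : Int) (max_nodes : Int) (out : List (String × List (List (String × String)))) : Prop := out = multi_hop_expand_alt graph seed_nodes hops max_nodes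
instance (graph : List (String × List (List (String × String)))) (seed_nodes : List String) (hops : Int) (max_nodes : Int) (out : List (String × List (List (String × String)))) : Decidable (Spec_multi_hop_expand graph seed_nodes hops max_nodes out) := by unfold Spec_multi_hop_expand; infer_instance

-- ===== CLAIM (what is proved, stated in full; the proofs are below) =====
def Claim_equal_multi_hop_expand : Prop := ∀ (graph : List (String × List (List (String × String)))) (seed_nodes : List String) (hops : Int) (max_nodes : Int), Dom_multi_hop_expand graph seed_nodes hops max_nodes → Pre_multi_hop_expand graph seed_nodes hops max_nodes → Spec_multi_hop_expand graph seed_nodes hops max_nodes (multi_hop_expand graph seed_nodes hops max_nodes)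

-- ===== LEMMAS AND PROOFS =====

-- pvBuildAdj, with its lets unfolded into A's pvSrc/pvTgt abbreviations
theorem pv_buildAdj_eq (E : List (List (String × String))) :
    pvBuildAdj E = E.foldl (fun adj e => (adj.modify (pvSrc e) [] (· ++ [pvTgt e])).modify (pvTgt e) [] (· ++ [pvSrc e])) PySem.Dict.empty := rfl

-- membership in the adjacency list: v is a recorded neighbour of u iff some edge joins them
theorem pv_mem_buildAdj_aux (E : List (List (String × String))) (d : PySem.Dict String (List String)) (u v : String) :
    v ∈ (E.foldl (fun adj e => (adj.modify (pvSrc e) [] (· ++ [pvTgt e])).modify (pvTgt e) [] (· ++ [pvSrc e])) d).getD u [] ↔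
    v ∈ d.getD u [] ∨ ∃ e ∈ E, (u = pvSrc e ∧ v = pvTgt e) ∨ (u = pvTgt e ∧ v = pvSrc e) := by
  induction E generalizing d with
  | nil => simp
  | cons e E ih =>
    rw [List.foldl_cons, ih]
    simp only [PySem.Dict.getD_modify, List.exists_mem_cons_iff]
    split_ifs with h2 h3 h4
    · subst h2; simp [h3, List.mem_append]; exact or_assoc
    · subst h2; simp [h3, List.mem_append]; exact or_assoc
    · subst h4; simp [h2, List.mem_append]; exact or_assoc
    · simp [h2, h4]

theorem pv_mem_buildAdj (E : List (List (String × String))) (u v : String) :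
    v ∈ (pvBuildAdj E).getD u [] ↔ ∃ e ∈ E, (u = pvSrc e ∧ v = pvTgt e) ∨ (u = pvTgt e ∧ v = pvSrc e) := by
  have h := pv_mem_buildAdj_aux E PySem.Dict.empty u v
  rw [pv_buildAdj_eq]
  simpa [PySem.Dict.getD_empty] using h

-- membership after one of A's hop iterations
theorem pv_mem_aStep_aux (E : List (List (String × String))) (S : PySem.Set String) (acc : PySem.Set String) (x : String) :
    x ∈ E.foldl (fun expanded e =>
      if PySem.Set.contains S (pvSrc e) || PySem.Set.contains S (pvTgt e) then
        PySem.Set.add (PySem.Set.add expanded (pvSrc e)) (pvTgt e)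
      else expanded) acc ↔
    x ∈ acc ∨ ∃ e ∈ E, (pvSrc e ∈ S ∨ pvTgt e ∈ S) ∧ (x = pvSrc e ∨ x = pvTgt e) := by
  induction E generalizing acc with
  | nil => simp
  | cons e E ih =>
    rw [List.foldl_cons, ih]
    simp only [List.exists_mem_cons_iff]
    by_cases h : pvSrc e ∈ S ∨ pvTgt e ∈ S
    · rw [if_pos (by simp only [Bool.or_eq_true, PySem.Set.contains_iff]; exact h)]
      simp only [PySem.Set.mem_add]
      constructor
      · rintro (((hx | hx) | hx) | hE)
        · exact Or.inl hx
        · exact Or.inr (Or.inl ⟨h, Or.inl hx⟩)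
        · exact Or.inr (Or.inl ⟨h, Or.inr hx⟩)
        · exact Or.inr (Or.inr hE)
      · rintro (hx | (⟨_, hx | hx⟩ | hE))
        · exact Or.inl (Or.inl (Or.inl hx))
        · exact Or.inl (Or.inl (Or.inr hx))
        · exact Or.inl (Or.inr hx)
        · exact Or.inr hE
    · rw [if_neg (by simp only [Bool.or_eq_true, PySem.Set.contains_iff]; exact h)]
      constructor
      · rintro (hx | hE)
        · exact Or.inl hx
        · exact Or.inr (Or.inr hE)
      · rintro (hx | (⟨hc, _⟩ | hE))
        · exact Or.inl hx
        · exact absurd hc h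
        · exact Or.inr hE

theorem pv_mem_aStep (E : List (List (String × String))) (S : PySem.Set String) (x : String) :
    x ∈ pvAStep E S ↔ x ∈ S ∨ ∃ e ∈ E, (pvSrc e ∈ S ∨ pvTgt e ∈ S) ∧ (x = pvSrc e ∨ x = pvTgt e) :=
  pv_mem_aStep_aux E S S x

theorem pv_nodup_aStep_aux (E : List (List (String × String))) (S acc : PySem.Set String) (h : acc.Nodup) :
    (E.foldl (fun expanded e =>
      if PySem.Set.contains S (pvSrc e) || PySem.Set.contains S (pvTgt e) then
        PySem.Set.add (PySem.Set.add expanded (pvSrc e)) (pvTgt e)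
      else expanded) acc).Nodup := by
  induction E generalizing acc with
  | nil => exact h
  | cons e E ih =>
    rw [List.foldl_cons]
    apply ih
    split_ifs
    · exact PySem.Set.nodup_add _ _ (PySem.Set.nodup_add _ _ h)
    · exact h

theorem pv_nodup_aStep (E : List (List (String × String))) (S : PySem.Set String) (h : S.Nodup) :
    (pvAStep E S).Nodup := pv_nodup_aStep_aux E S S h

-- B's inner fold: the visited component grows exactly by Set.update
theorem pv_inner_step_fst (acc : PySem.Set String × List String) (v : String) :
    (if PySem.Set.contains acc.1 v then acc else (PySem.Set.add acc.1 v, acc.2 ++ [v])).1 = PySem.Set.add acc.1 v := by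
  split_ifs with h
  · exact (PySem.Set.add_of_mem ((PySem.Set.contains_iff _ _).mp h)).symm
  · rfl

theorem pv_inner_fst (ns : List String) (acc : PySem.Set String × List String) :
    (ns.foldl (fun acc2 v => if PySem.Set.contains acc2.1 v then acc2 else (PySem.Set.add acc2.1 v, acc2.2 ++ [v])) acc).1
      = PySem.Set.update acc.1 ns := by
  induction ns generalizing acc with
  | nil => rfl
  | cons v ns ih =>
    rw [List.foldl_cons, ih, pv_inner_step_fst, PySem.Set.update_cons]

theorem pv_inner_append (ns : List String) (acc : PySem.Set String × List String) (V0 : List String) (h : acc.1 = V0 ++ acc.2) :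
    (ns.foldl (fun acc2 v => if PySem.Set.contains acc2.1 v then acc2 else (PySem.Set.add acc2.1 v, acc2.2 ++ [v])) acc).1
      = V0 ++ (ns.foldl (fun acc2 v => if PySem.Set.contains acc2.1 v then acc2 else (PySem.Set.add acc2.1 v, acc2.2 ++ [v])) acc).2 := by
  induction ns generalizing acc with
  | nil => exact h
  | cons v ns ih =>
    rw [List.foldl_cons]
    apply ih
    split_ifs with hc
    · exact h
    · show PySem.Set.add acc.1 v = V0 ++ (acc.2 ++ [v])
      rw [PySem.Set.add_of_not_mem (fun hm => hc ((PySem.Set.contains_iff _ _).mpr hm)), h, List.append_assoc]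

theorem pv_level_fst (adj : PySem.Dict String (List String)) (F : List String) (acc : PySem.Set String × List String) :
    (F.foldl (fun acc u => (PySem.Dict.getD adj u []).foldl (fun acc2 v => if PySem.Set.contains acc2.1 v then acc2 else (PySem.Set.add acc2.1 v, acc2.2 ++ [v])) acc) acc).1
      = F.foldl (fun s u => PySem.Set.update s (PySem.Dict.getD adj u [])) acc.1 := by
  induction F generalizing acc with
  | nil => rfl
  | cons u F ih => rw [List.foldl_cons, List.foldl_cons, ih, pv_inner_fst]

theorem pv_mem_foldl_update (adj : PySem.Dict String (List String)) (F : List String) (s : PySem.Set String) (x : String) :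
    x ∈ F.foldl (fun s u => PySem.Set.update s (PySem.Dict.getD adj u [])) s ↔ x ∈ s ∨ ∃ u ∈ F, x ∈ PySem.Dict.getD adj u [] := by
  induction F generalizing s with
  | nil => simp
  | cons u F ih =>
    rw [List.foldl_cons, ih]
    simp only [PySem.Set.mem_update, List.exists_mem_cons_iff]
    exact or_assoc

theorem pv_nodup_foldl_update (adj : PySem.Dict String (List String)) (F : List String) (s : PySem.Set String) (h : s.Nodup) :
    (F.foldl (fun s u => PySem.Set.update s (PySem.Dict.getD adj u [])) s).Nodup := by
  induction F generalizing s with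
  | nil => exact h
  | cons u F ih =>
    rw [List.foldl_cons]
    exact ih _ (PySem.Set.nodup_update _ _ h)

theorem pv_level_append (adj : PySem.Dict String (List String)) (F : List String) (acc : PySem.Set String × List String) (V0 : List String) (h : acc.1 = V0 ++ acc.2) :
    (F.foldl (fun acc u => (PySem.Dict.getD adj u []).foldl (fun acc2 v => if PySem.Set.contains acc2.1 v then acc2 else (PySem.Set.add acc2.1 v, acc2.2 ++ [v])) acc) acc).1
      = V0 ++ (F.foldl (fun acc u => (PySem.Dict.getD adj u []).foldl (fun acc2 v => if PySem.Set.contains acc2.1 v then acc2 else (PySem.Set.add acc2.1 v, acc2.2 ++ [v])) acc) acc).2 := by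
  induction F generalizing acc with
  | nil => exact h
  | cons u F ih =>
    rw [List.foldl_cons]
    exact ih _ (pv_inner_append _ _ _ h)

theorem pv_bLevel_fst (adj : PySem.Dict String (List String)) (V : PySem.Set String) (F : List String) :
    (pvBLevel adj V F).1 = F.foldl (fun s u => PySem.Set.update s (PySem.Dict.getD adj u [])) V :=
  pv_level_fst adj F (V, [])

theorem pv_mem_bLevel_fst (adj : PySem.Dict String (List String)) (V : PySem.Set String) (F : List String) (x : String) :
    x ∈ (pvBLevel adj V F).1 ↔ x ∈ V ∨ ∃ u ∈ F, x ∈ PySem.Dict.getD adj u [] := by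
  rw [pv_bLevel_fst]; exact pv_mem_foldl_update adj F V x

theorem pv_nodup_bLevel_fst (adj : PySem.Dict String (List String)) (V : PySem.Set String) (F : List String) (h : V.Nodup) :
    (pvBLevel adj V F).1.Nodup := by
  rw [pv_bLevel_fst]; exact pv_nodup_foldl_update adj F V h

theorem pv_bLevel_append (adj : PySem.Dict String (List String)) (V : PySem.Set String) (F : List String) :
    (pvBLevel adj V F).1 = V ++ (pvBLevel adj V F).2 :=
  pv_level_append adj F (V, []) V (by simp)

-- the BFS invariant relating A's node set and B's (visited, frontier)
def pvGood (E : List (List (String × String))) (S V : PySem.Set String) (F : List String) : Prop :=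
  (∀ x, x ∈ S ↔ x ∈ V) ∧ S.Nodup ∧ V.Nodup ∧
  (∀ u ∈ V, u ∉ F → ∀ v ∈ (pvBuildAdj E).getD u [], v ∈ V) ∧ (∀ u ∈ F, u ∈ V)

theorem pv_step_mem (E : List (List (String × String))) (S V : PySem.Set String) (F : List String)
    (hG : pvGood E S V F) (x : String) :
    x ∈ pvAStep E S ↔ x ∈ (pvBLevel (pvBuildAdj E) V F).1 := by
  obtain ⟨hmem, hSnd, hVnd, hcl, hFV⟩ := hG
  rw [pv_mem_aStep, pv_mem_bLevel_fst]
  constructor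
  · rintro (hS | ⟨e, he, hinc, hend⟩)
    · exact Or.inl ((hmem x).mp hS)
    · rcases hend with rfl | rfl
      · rcases hinc with hsrc | htgt
        · exact Or.inl ((hmem _).mp hsrc)
        · have htV : pvTgt e ∈ V := (hmem _).mp htgt
          have hadj : pvSrc e ∈ (pvBuildAdj E).getD (pvTgt e) [] :=
            (pv_mem_buildAdj E _ _).mpr ⟨e, he, Or.inr ⟨rfl, rfl⟩⟩
          by_cases hF : pvTgt e ∈ F
          · exact Or.inr ⟨pvTgt e, hF, hadj⟩
          · exact Or.inl (hcl _ htV hF _ hadj)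
      · rcases hinc with hsrc | htgt
        · have hsV : pvSrc e ∈ V := (hmem _).mp hsrc
          have hadj : pvTgt e ∈ (pvBuildAdj E).getD (pvSrc e) [] :=
            (pv_mem_buildAdj E _ _).mpr ⟨e, he, Or.inl ⟨rfl, rfl⟩⟩
          by_cases hF : pvSrc e ∈ F
          · exact Or.inr ⟨pvSrc e, hF, hadj⟩
          · exact Or.inl (hcl _ hsV hF _ hadj)
        · exact Or.inl ((hmem _).mp htgt)
  · rintro (hV | ⟨u, hu, hadj⟩)
    · exact Or.inl ((hmem x).mpr hV)
    · obtain ⟨e, he, h'⟩ := (pv_mem_buildAdj E u x).mp hadj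
      have huS : u ∈ S := (hmem u).mpr (hFV u hu)
      rcases h' with ⟨hu', hx⟩ | ⟨hu', hx⟩
      · exact Or.inr ⟨e, he, Or.inl (hu' ▸ huS), Or.inr hx⟩
      · exact Or.inr ⟨e, he, Or.inr (hu' ▸ huS), Or.inl hx⟩

theorem pv_good_step (E : List (List (String × String))) (S V : PySem.Set String) (F : List String)
    (hG : pvGood E S V F) :
    pvGood E (pvAStep E S) (pvBLevel (pvBuildAdj E) V F).1 (pvBLevel (pvBuildAdj E) V F).2 := by
  obtain ⟨hmem, hSnd, hVnd, hcl, hFV⟩ := hG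
  refine ⟨pv_step_mem E S V F ⟨hmem, hSnd, hVnd, hcl, hFV⟩, pv_nodup_aStep E S hSnd,
    pv_nodup_bLevel_fst _ V F hVnd, ?_, ?_⟩
  · intro u huV' hunF' v hv
    have happ := pv_bLevel_append (pvBuildAdj E) V F
    have huV : u ∈ V := by
      rw [happ] at huV'
      rcases List.mem_append.mp huV' with h | h
      · exact h
      · exact absurd h hunF'
    by_cases hF : u ∈ F
    · exact (pv_mem_bLevel_fst _ V F v).mpr (Or.inr ⟨u, hF, hv⟩)
    · exact (pv_mem_bLevel_fst _ V F v).mpr (Or.inl (hcl u huV hF v hv))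
  · intro u hu
    rw [pv_bLevel_append (pvBuildAdj E) V F]
    exact List.mem_append_right _ hu

theorem pv_len_eq (l1 l2 : List String) (h1 : l1.Nodup) (h2 : l2.Nodup)
    (h : ∀ x, x ∈ l1 ↔ x ∈ l2) : l1.length = l2.length :=
  ((List.perm_ext_iff_of_nodup h1 h2).mpr h).length_eq

-- if every edge incident to S already has both endpoints in S, A's hop is the identity
theorem pv_aStable (E : List (List (String × String))) (S : PySem.Set String) :
    (∀ e ∈ E, (pvSrc e ∈ S ∨ pvTgt e ∈ S) → pvSrc e ∈ S ∧ pvTgt e ∈ S) → pvAStep E S = S := by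
  induction E with
  | nil => intro _; rfl
  | cons e E ih =>
    intro h
    have hf : (if PySem.Set.contains S (pvSrc e) || PySem.Set.contains S (pvTgt e) then
        PySem.Set.add (PySem.Set.add S (pvSrc e)) (pvTgt e) else S) = S := by
      split_ifs with hc
      · have hinc : pvSrc e ∈ S ∨ pvTgt e ∈ S := by
          simpa [Bool.or_eq_true, PySem.Set.contains_iff] using hc
        obtain ⟨h1, h2⟩ := h e (by simp) hinc
        rw [PySem.Set.add_of_mem h1, PySem.Set.add_of_mem h2]
      · rfl
    have hstep : pvAStep (e :: E) S = pvAStep E S := by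
      unfold pvAStep
      rw [List.foldl_cons]
      simp only [hf]
    rw [hstep]
    exact ih fun e' he' => h e' (List.mem_cons_of_mem _ he')

theorem pv_aLoopConst (E : List (List (String × String))) (mx : Int) (S : PySem.Set String)
    (h : pvAStep E S = S) : ∀ n, pvALoop E mx n S = S := by
  intro n
  induction n with
  | zero => rfl
  | succ n ih =>
    simp only [pvALoop, h]
    split_ifs with _
    · rfl
    · exact ih

-- the main loop correspondence: A's hop loop and B's BFS reach the same set of names
theorem pv_loop_eq (E : List (List (String × String))) (mx : Int) :
    ∀ (n : Nat) (S V : PySem.Set String) (F : List String), pvGood E S V F →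
    ∀ x, (x ∈ pvALoop E mx n S ↔ x ∈ pvBLoop (pvBuildAdj E) mx n V F) := by
  intro n
  induction n with
  | zero => intro S V F hG x; exact hG.1 x
  | succ n ih =>
    intro S V F hG x
    have hG' := pv_good_step E S V F hG
    have hlen : ((pvAStep E S).length : Int) = ((pvBLevel (pvBuildAdj E) V F).1.length : Int) := by
      exact_mod_cast pv_len_eq _ _ hG'.2.1 hG'.2.2.1 hG'.1
    simp only [pvALoop, pvBLoop]
    by_cases hm : mx ≤ ((pvAStep E S).length : Int)
    · rw [if_pos hm, if_pos (Or.inl (by rw [← hlen]; exact hm))]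
      exact hG'.1 x
    · rw [if_neg hm]
      by_cases hF : (pvBLevel (pvBuildAdj E) V F).2 = []
      · rw [if_pos (Or.inr hF)]
        have hstable : pvAStep E (pvAStep E S) = pvAStep E S := by
          apply pv_aStable
          intro e he hinc
          have hcl' := hG'.2.2.2.1
          rw [hF] at hcl'
          have hmem' := hG'.1
          have hclosed : ∀ u ∈ (pvBLevel (pvBuildAdj E) V F).1, ∀ v ∈ (pvBuildAdj E).getD u [], v ∈ (pvBLevel (pvBuildAdj E) V F).1 :=
            fun u hu v hv => hcl' u hu (by simp) v hv
          constructor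
          · rcases hinc with hs | ht
            · exact hs
            · have : pvSrc e ∈ (pvBLevel (pvBuildAdj E) V F).1 :=
                hclosed _ ((hmem' _).mp ht) _ ((pv_mem_buildAdj E _ _).mpr ⟨e, he, Or.inr ⟨rfl, rfl⟩⟩)
              exact (hmem' _).mpr this
          · rcases hinc with hs | ht
            · have : pvTgt e ∈ (pvBLevel (pvBuildAdj E) V F).1 :=
                hclosed _ ((hmem' _).mp hs) _ ((pv_mem_buildAdj E _ _).mpr ⟨e, he, Or.inl ⟨rfl, rfl⟩⟩)
              exact (hmem' _).mpr this
            · exact ht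
        rw [pv_aLoopConst E mx (pvAStep E S) hstable n]
        exact hG'.1 x
      · rw [if_neg (by rintro (h | h); exacts [hm (by rw [hlen]; exact h), hF h])]
        exact ih _ _ _ hG' x

-- contains is determined by membership
theorem pv_contains_congr (s t : PySem.Set String) (h : ∀ x, x ∈ s ↔ x ∈ t) (x : String) :
    PySem.Set.contains s x = PySem.Set.contains t x := by
  by_cases hm : x ∈ s
  · rw [(PySem.Set.contains_iff s x).mpr hm, (PySem.Set.contains_iff t x).mpr ((h x).mp hm)]
  · rw [Bool.eq_false_iff.mpr fun hx => hm ((PySem.Set.contains_iff s x).mp hx),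
        Bool.eq_false_iff.mpr fun hx => hm ((h x).mpr ((PySem.Set.contains_iff t x).mp hx))]

-- the two selection passes correspond: A's (ordered, selected) ≙ B's (picked, names, budget),
-- with budget = max_nodes - |picked| and names sharing membership with selected and with the
-- name set A recomputes from the ordered output
theorem pv_pick_eq (mx : Int) (S V : PySem.Set String) (hSV : ∀ x, x ∈ S ↔ x ∈ V) :
    ∀ (ns ordered : List (List (String × String))) (sel names : PySem.Set String) (budget : Int),
    budget = mx - ordered.length →
    (∀ x, x ∈ sel ↔ x ∈ names) →
    (∀ x, x ∈ names ↔ x ∈ PySem.Set.ofList (ordered.map (fun node => PySem.Dict.getD (⟨node⟩ : PySem.Dict String String) "name" ""))) →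
    pvASelect mx S ns ordered sel = (pvBPick V ns ordered names budget).1 ∧
    (∀ x, x ∈ (pvBPick V ns ordered names budget).2 ↔
      x ∈ PySem.Set.ofList ((pvASelect mx S ns ordered sel).map (fun node => PySem.Dict.getD (⟨node⟩ : PySem.Dict String String) "name" ""))) := by
  intro ns
  induction ns with
  | nil =>
    intro ordered sel names budget _ _ hnames
    exact ⟨rfl, hnames⟩
  | cons node rest ih =>
    intro ordered sel names budget hb hsel hnames
    simp only [pvASelect, pvBPick]
    cases hget : PySem.Dict.get? (⟨node⟩ : PySem.Dict String String) "name" with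
    | none =>
      simp only
      have hstop : (mx ≤ (ordered.length : Int)) ↔ (budget ≤ 0) := by omega
      by_cases hs : budget ≤ 0
      · rw [if_pos (hstop.mpr hs), if_pos hs]
        exact ⟨rfl, hnames⟩
      · rw [if_neg (fun hx => hs (hstop.mp hx)), if_neg hs]
        exact ih ordered sel names budget hb hsel hnames
    | some nm =>
      have hcond : (PySem.Set.contains S nm && !PySem.Set.contains sel nm)
          = (PySem.Set.contains V nm && !PySem.Set.contains names nm) := by
        rw [pv_contains_congr S V hSV, pv_contains_congr sel names hsel]
      simp only [hcond]
      by_cases hc : (PySem.Set.contains V nm && !PySem.Set.contains names nm) = true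
      · rw [if_pos hc, if_pos hc]
        simp only
        have hnode : PySem.Dict.getD (⟨node⟩ : PySem.Dict String String) "name" "" = nm := by
          simp [PySem.Dict.getD_eq_get?_getD, hget]
        have hnames' : ∀ x, x ∈ PySem.Set.add names nm ↔
            x ∈ PySem.Set.ofList ((ordered ++ [node]).map (fun node => PySem.Dict.getD (⟨node⟩ : PySem.Dict String String) "name" "")) := by
          intro x
          rw [PySem.Set.mem_add]
          simp only [List.map_append, List.map_cons, List.map_nil, PySem.Set.mem_ofList,
            List.mem_append, List.mem_singleton, hnode]
          rw [hnames x]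
          simp only [PySem.Set.mem_ofList]
        have hstop : (mx ≤ ((ordered ++ [node]).length : Int)) ↔ (budget - 1 ≤ 0) := by
          simp only [List.length_append, List.length_cons, List.length_nil]
          omega
        by_cases hs : budget - 1 ≤ 0
        · rw [if_pos (hstop.mpr hs), if_pos hs]
          exact ⟨rfl, hnames'⟩
        · rw [if_neg (fun hx => hs (hstop.mp hx)), if_neg hs]
          refine ih (ordered ++ [node]) (PySem.Set.add sel nm) (PySem.Set.add names nm) (budget - 1) ?_ ?_ hnames'
          · simp only [List.length_append, List.length_cons, List.length_nil]; omega
          · intro x; rw [PySem.Set.mem_add, PySem.Set.mem_add, hsel x]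
      · rw [if_neg hc, if_neg hc]
        simp only
        have hstop : (mx ≤ (ordered.length : Int)) ↔ (budget ≤ 0) := by omega
        by_cases hs : budget ≤ 0
        · rw [if_pos (hstop.mpr hs), if_pos hs]
          exact ⟨rfl, hnames⟩
        · rw [if_neg (fun hx => hs (hstop.mp hx)), if_neg hs]
          exact ih ordered sel names budget hb hsel hnames

theorem pv_main_eq (graph : List (String × List (List (String × String)))) (seed_nodes : List String) (hops : Int) (max_nodes : Int) :
    multi_hop_expand graph seed_nodes hops max_nodes = multi_hop_expand_alt graph seed_nodes hops max_nodes := by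
  cases seed_nodes with
  | nil => rfl
  | cons s ss =>
    have hne : PySem.Set.ofList (s :: ss) ≠ [] := by simp [PySem.Set.ofList_cons]
    simp only [multi_hop_expand, multi_hop_expand_alt, if_neg hne, if_neg (List.cons_ne_nil s ss)]
    have hGood : pvGood (PySem.Dict.getD (⟨graph⟩ : PySem.Dict String (List (List (String × String)))) "edges" [])
        (PySem.Set.ofList (s :: ss)) (PySem.Set.ofList (PySem.List.dedup (s :: ss))) (PySem.List.dedup (s :: ss)) := by
      simp only [PySem.List.dedup_eq_ofList, PySem.Set.ofList_ofList]
      exact ⟨fun x => Iff.rfl, PySem.Set.nodup_ofList _, PySem.Set.nodup_ofList _,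
        fun u hu hnu _ _ => absurd hu hnu, fun u hu => hu⟩
    have hmemfin := pv_loop_eq _ max_nodes hops.toNat _ _ _ hGood
    obtain ⟨hpicked, hnms⟩ := pv_pick_eq max_nodes _ _ hmemfin
      (PySem.Dict.getD (⟨graph⟩ : PySem.Dict String (List (List (String × String)))) "nodes" [])
      [] PySem.Set.empty PySem.Set.empty max_nodes (by simp)
      (fun x => Iff.rfl) (by simp [PySem.Set.empty])
    rw [← hpicked]
    have hfilter : ∀ e, (PySem.Set.contains (PySem.Set.ofList ((pvASelect max_nodes
          (pvALoop (PySem.Dict.getD (⟨graph⟩ : PySem.Dict String (List (List (String × String)))) "edges" []) max_nodes hops.toNat (PySem.Set.ofList (s :: ss)))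
          (PySem.Dict.getD (⟨graph⟩ : PySem.Dict String (List (List (String × String)))) "nodes" []) [] PySem.Set.empty).map
            (fun node => PySem.Dict.getD (⟨node⟩ : PySem.Dict String String) "name" ""))) (pvSrc e) ||
        PySem.Set.contains (PySem.Set.ofList ((pvASelect max_nodes
          (pvALoop (PySem.Dict.getD (⟨graph⟩ : PySem.Dict String (List (List (String × String)))) "edges" []) max_nodes hops.toNat (PySem.Set.ofList (s :: ss)))
          (PySem.Dict.getD (⟨graph⟩ : PySem.Dict String (List (List (String × String)))) "nodes" []) [] PySem.Set.empty).map
            (fun node => PySem.Dict.getD (⟨node⟩ : PySem.Dict String String) "name" ""))) (pvTgt e))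
        = (PySem.Set.contains (pvBPick
            (pvBLoop (pvBuildAdj (PySem.Dict.getD (⟨graph⟩ : PySem.Dict String (List (List (String × String)))) "edges" [])) max_nodes hops.toNat
              (PySem.Set.ofList (PySem.List.dedup (s :: ss))) (PySem.List.dedup (s :: ss)))
            (PySem.Dict.getD (⟨graph⟩ : PySem.Dict String (List (List (String × String)))) "nodes" []) [] PySem.Set.empty max_nodes).2
            (PySem.Dict.getD (⟨e⟩ : PySem.Dict String String) "source" "") ||
          PySem.Set.contains (pvBPick
            (pvBLoop (pvBuildAdj (PySem.Dict.getD (⟨graph⟩ : PySem.Dict String (List (List (String × String)))) "edges" [])) max_nodes hops.toNat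
              (PySem.Set.ofList (PySem.List.dedup (s :: ss))) (PySem.List.dedup (s :: ss)))
            (PySem.Dict.getD (⟨graph⟩ : PySem.Dict String (List (List (String × String)))) "nodes" []) [] PySem.Set.empty max_nodes).2
            (PySem.Dict.getD (⟨e⟩ : PySem.Dict String String) "target" "")) := by
      intro e
      rw [pv_contains_congr _ _ (fun x => (hnms x).symm) (pvSrc e),
          pv_contains_congr _ _ (fun x => (hnms x).symm) (pvTgt e)]
      rfl
    rw [List.filter_congr (fun e _ => hfilter e)]

-- ===== VERDICT (by name: the statement is the Claim_ definition above) =====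
theorem multi_hop_expand_spec : Claim_equal_multi_hop_expand := by
  intro graph seed_nodes hops max_nodes _hDom _hPre
  unfold Spec_multi_hop_expand
  exact pv_main_eq graph seed_nodes hops max_nodes
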